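-- pv_equiv track=rewrite | github.com/BREADLuVER/Tech-OA-Practice | countInaccurateResults.py | countInaccurateResults
-- ===== SOURCE A (Python) =====
-- from typing import List
--
-- def countInaccurateResults(processOrder: List[int], executionOrder: List[int]) -> int:
--     track = {k: i for i,k in enumerate(processOrder)}
--     inaccurate = 0
--     executed = set()
--
--     for p in executionOrder:
--         curr_pos = track[p]
--         for i in range(curr_pos):
--             if processOrder[i] not in executed:
--                 inaccurate += 1
--                 break
--         executed.add(p)
--
--     return inaccurate
-- ===== SOURCE B (Python) =====
-- def countInaccurateResults(processOrder, executionOrder):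
--     pos = {}
--     i = 0
--     for v in processOrder:
--         pos[v] = i
--         i += 1
--     rep = [pos[v] for v in processOrder]   # canonical (last-occurrence) index of each slot
--     n = len(processOrder)
--     done = [False] * n
--     ptr = 0  # smallest slot index whose value is not yet executed (or n)
--     bad = 0
--     for p in executionOrder:
--         q = pos[p]
--         if ptr < q:
--             bad += 1
--         done[q] = True
--         while ptr < n and done[rep[ptr]]:
--             ptr += 1
--     return bad
-- ===== Notes on version B (the rewrite author's own statement) =====
-- stated objective: faster
-- what changed: Replaces A's per-execution rescan of the whole prefix (with a hash set of executed values) by a boolean done-array over canonical slot indices plus a monotonically advancing pointer to the smallest unexecuted slot, so each execution costs O(1) amortised.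
import Mathlib
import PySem

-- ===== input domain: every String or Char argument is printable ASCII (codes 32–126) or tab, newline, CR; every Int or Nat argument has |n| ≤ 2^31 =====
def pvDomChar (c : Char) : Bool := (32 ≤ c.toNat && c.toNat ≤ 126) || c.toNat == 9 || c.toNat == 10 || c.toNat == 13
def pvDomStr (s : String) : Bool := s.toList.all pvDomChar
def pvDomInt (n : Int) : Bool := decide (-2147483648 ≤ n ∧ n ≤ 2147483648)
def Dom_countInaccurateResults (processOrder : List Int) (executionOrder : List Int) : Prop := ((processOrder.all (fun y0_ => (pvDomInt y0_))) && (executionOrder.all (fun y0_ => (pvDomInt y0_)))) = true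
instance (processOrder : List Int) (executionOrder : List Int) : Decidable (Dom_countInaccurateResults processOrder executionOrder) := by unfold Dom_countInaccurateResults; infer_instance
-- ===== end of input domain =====

-- B replaces A's per-execution rescan of the prefix (with a set of executed values) by a
-- boolean done-array over canonical slot indices plus a monotonically advancing pointer
-- to the smallest unexecuted slot (objective: faster, asymptotic).


-- ===== PORT A =====
-- track = {k: i for i,k in enumerate(processOrder)}
def trackA (processOrder : List Int) : PySem.Dict Int Int :=
  (PySem.List.enumerate processOrder 0).foldl (fun d q => d.insert q.2 q.1) PySem.Dict.empty

-- 'for i in range(curr_pos): if processOrder[i] not in executed: inaccurate += 1; break'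
-- returns whether the break (the += 1) fired; index access is in range whenever i < len processOrder
def innerA (processOrder : List Int) (executed : PySem.Set Int) : List Int → Bool
  | [] => false
  | i :: rest =>
    if ¬ PySem.Set.contains executed (PySem.List.pyGetD processOrder i 0) then true
    else innerA processOrder executed rest

def loopA (processOrder : List Int) (track : PySem.Dict Int Int) :
    List Int → Int → PySem.Set Int → Int
  | [], inaccurate, _ => inaccurate
  | p :: rest, inaccurate, executed =>
    match track.get? p with
    | none => inaccurate   -- Python: KeyError (excluded by Pre_)
    | some currPos =>
      let inaccurate' :=
        if innerA processOrder executed (PySem.List.pyRange 0 currPos 1) then inaccurate + 1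
        else inaccurate
      loopA processOrder track rest inaccurate' (PySem.Set.add executed p)

def countInaccurateResults (processOrder : List Int) (executionOrder : List Int) : Int :=
  loopA processOrder (trackA processOrder) executionOrder 0 PySem.Set.empty

-- ===== PORT B =====
-- 'pos = {}; i = 0; for v in processOrder: pos[v] = i; i += 1'
def posBuild : List Int → Int → PySem.Dict Int Int → PySem.Dict Int Int
  | [], _, d => d
  | v :: rest, i, d => posBuild rest (i + 1) (d.insert v i)

-- 'while ptr < n and done[rep[ptr]]: ptr += 1'   (n = len(rep) = len(processOrder);
-- rep[ptr] is always a valid index of done, so the total pyGetD reads are exact)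
def advB (rep : List Int) (done : List Bool) (ptr : Nat) : Nat :=
  if h : ptr < rep.length ∧
         PySem.List.pyGetD done (PySem.List.pyGetD rep (ptr : Int) 0) false = true then
    advB rep done (ptr + 1)
  else ptr
termination_by rep.length - ptr
decreasing_by omega

def loopB (rep : List Int) (pos : PySem.Dict Int Int) :
    List Int → Nat → Int → List Bool → Int
  | [], _, bad, _ => bad
  | p :: rest, ptr, bad, done =>
    match pos.get? p with
    | none => bad   -- Python: KeyError (excluded by Pre_)
    | some q =>
      let bad' := if (ptr : Int) < q then bad + 1 else bad
      let done' := PySem.List.pySetD done q true   -- done[q] = True; q is always in range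
      loopB rep pos rest (advB rep done' ptr) bad' done'

def countInaccurateResults_alt (processOrder : List Int) (executionOrder : List Int) : Int :=
  let pos := posBuild processOrder 0 PySem.Dict.empty
  -- rep = [pos[v] for v in processOrder]  (every v of processOrder is a key of pos)
  let rep := processOrder.map (fun v => pos.getD v 0)
  loopB rep pos executionOrder 0 0 (List.replicate processOrder.length false)

-- ===== PRECONDITION & SPEC =====
-- Pre_: both Pythons raise KeyError when an executed process is absent from processOrder.
def Pre_countInaccurateResults (processOrder : List Int) (executionOrder : List Int) : Prop :=
  ∀ p ∈ executionOrder, p ∈ processOrder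
instance (processOrder : List Int) (executionOrder : List Int) : Decidable (Pre_countInaccurateResults processOrder executionOrder) := by unfold Pre_countInaccurateResults; infer_instance

def pvWitness_countInaccurateResults : List Int × List Int := ([3, 1, 2], [1, 3, 2])

def Spec_countInaccurateResults (processOrder : List Int) (executionOrder : List Int) (out : Int) : Prop := out = countInaccurateResults_alt processOrder executionOrder
instance (processOrder : List Int) (executionOrder : List Int) (out : Int) : Decidable (Spec_countInaccurateResults processOrder executionOrder out) := by unfold Spec_countInaccurateResults; infer_instance

-- ===== CLAIM (what is proved, stated in full; the proofs are below) =====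
def Claim_equal_countInaccurateResults : Prop := ∀ (processOrder : List Int) (executionOrder : List Int), Dom_countInaccurateResults processOrder executionOrder → Pre_countInaccurateResults processOrder executionOrder → Spec_countInaccurateResults processOrder executionOrder (countInaccurateResults processOrder executionOrder)

-- ===== LEMMAS AND PROOFS =====

-- reading a valid index with pyGetD is plain list indexing
theorem pyGetD_at {α : Type} (xs : List α) (d : α) (j : Nat) (hj : j < xs.length) :
    PySem.List.pyGetD xs (j : Int) d = xs[j] := by
  rw [PySem.List.pyGetD_natCast]
  simp [List.getD, List.getElem?_eq_getElem hj]

-- B's explicit dict-building loop folds the same insertions as A's enumerate comprehension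
theorem posBuild_eq_fold (xs : List Int) :
    ∀ (i : Int) (d : PySem.Dict Int Int),
      posBuild xs i d = (PySem.List.enumerate xs i).foldl (fun d q => d.insert q.2 q.1) d := by
  induction xs with
  | nil => intro i d; rw [PySem.List.enumerate_nil]; rfl
  | cons x rest ih =>
    intro i d
    rw [PySem.List.enumerate_cons, List.foldl_cons]
    exact ih (i + 1) (d.insert x i)

-- every value stored by the enumerate-dict fold satisfies a predicate holding of all
-- (element, index) pairs of the enumerated list and of everything already in the dict
theorem foldEnum_get?_char (G : Int → Int → Prop) (xs : List Int) :
    ∀ (s : Int) (d : PySem.Dict Int Int),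
      (∀ p q, d.get? p = some q → G p q) →
      (∀ (k : Nat) (hk : k < xs.length), G (xs.get ⟨k, hk⟩) (s + k)) →
      ∀ p q,
        ((PySem.List.enumerate xs s).foldl (fun d q => d.insert q.2 q.1) d).get? p = some q →
        G p q := by
  induction xs with
  | nil =>
    intro s d hd _ p q h
    rw [PySem.List.enumerate_nil] at h
    exact hd p q h
  | cons x rest ih =>
    intro s d hd hxs p q h
    rw [PySem.List.enumerate_cons, List.foldl_cons] at h
    refine ih (s + 1) (d.insert x s) ?_ ?_ p q h
    · intro p' q' h'
      rw [PySem.Dict.get?_insert] at h'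
      by_cases hpx : p' = x
      · subst hpx
        rw [if_pos rfl] at h'
        injection h' with h2
        subst h2
        simpa using hxs 0 (by simp)
      · rw [if_neg hpx] at h'
        exact hd p' q' h'
    · intro k hk
      have := hxs (k + 1) (by simpa using Nat.succ_lt_succ hk)
      have harith : s + 1 + (k : Int) = s + ((k : Nat) + 1 : Nat) := by push_cast; ring
      rw [harith]
      simpa using this

-- the key characterisation of A's dict: a stored index is in range and reads back its key
theorem track_char (po : List Int) (p q : Int) (h : (trackA po).get? p = some q) :
    0 ≤ q ∧ q < po.length ∧ PySem.List.pyGetD po q 0 = p := by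
  refine foldEnum_get?_char
    (fun p q => 0 ≤ q ∧ q < po.length ∧ PySem.List.pyGetD po q 0 = p) po 0 PySem.Dict.empty
    ?_ ?_ p q h
  · intro p' q' h'
    rw [PySem.Dict.get?_empty] at h'
    exact absurd h' (by simp)
  · intro k hk
    refine ⟨by positivity, by omega, ?_⟩
    rw [zero_add, pyGetD_at po 0 k hk]
    rfl

-- membership in the list gives presence in the dict
theorem foldEnum_get?_isSome (xs : List Int) :
    ∀ (s : Int) (d : PySem.Dict Int Int) (p : Int),
      (p ∈ xs ∨ (d.get? p).isSome) →
      (((PySem.List.enumerate xs s).foldl (fun d q => d.insert q.2 q.1) d).get? p).isSome := by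
  induction xs with
  | nil =>
    intro s d p h
    rw [PySem.List.enumerate_nil]
    simpa using h.resolve_left (by simp)
  | cons x rest ih =>
    intro s d p h
    rw [PySem.List.enumerate_cons, List.foldl_cons]
    refine ih (s + 1) (d.insert x s) p ?_
    by_cases hpx : p = x
    · right; rw [PySem.Dict.get?_insert, if_pos hpx]; simp
    · rcases h with h | h
      · left; simpa [hpx] using h
      · right; rwa [PySem.Dict.get?_insert, if_neg hpx]

theorem track_isSome (po : List Int) (p : Int) (hp : p ∈ po) :
    ((trackA po).get? p).isSome :=
  foldEnum_get?_isSome po 0 PySem.Dict.empty p (Or.inl hp)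

-- the rep list: rep[j] is the canonical index of slot j's value
theorem rep_spec (po : List Int) (j : Nat) (hj : j < po.length) :
    ∃ r : Nat,
      PySem.List.pyGetD (po.map (fun v => (trackA po).getD v 0)) (j : Int) 0 = (r : Int) ∧
      r < po.length ∧
      (trackA po).get? po[j] = some (r : Int) ∧
      PySem.List.pyGetD po (r : Int) 0 = po[j] := by
  obtain ⟨q, hq⟩ := Option.isSome_iff_exists.mp (track_isSome po po[j] (List.getElem_mem hj))
  obtain ⟨hq0, hqlt, hqval⟩ := track_char po po[j] q hq
  have hqc : ((q.toNat : Nat) : Int) = q := by omega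
  refine ⟨q.toNat, ?_, by omega, by rw [hq, hqc], by rw [hqc]; exact hqval⟩
  have hjm : j < (po.map (fun v => (trackA po).getD v 0)).length := by simpa using hj
  rw [pyGetD_at _ 0 j hjm]
  rw [List.getElem_map]
  show ((trackA po).get? po[j]).getD 0 = _
  rw [hq, Option.getD_some, hqc]

-- correspondence between A's executed set and B's done array
def Corr (po : List Int) (s : PySem.Set Int) (done : List Bool) : Prop :=
  done.length = po.length ∧
  ∀ j : Nat, j < po.length →
    PySem.List.pyGetD done
      (PySem.List.pyGetD (po.map (fun v => (trackA po).getD v 0)) (j : Int) 0) false =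
    PySem.Set.contains s (PySem.List.pyGetD po (j : Int) 0)

-- ptr is the least slot index whose value is not yet executed
def PtrB (rep : List Int) (done : List Bool) (ptr : Nat) : Prop :=
  ptr ≤ rep.length ∧
  (∀ j : Nat, j < ptr → PySem.List.pyGetD done (PySem.List.pyGetD rep (j : Int) 0) false = true) ∧
  (ptr < rep.length → PySem.List.pyGetD done (PySem.List.pyGetD rep (ptr : Int) 0) false = false)

-- A's inner break-scan over range(a, c) decides 'ptr < c' given the least-unexecuted facts
theorem innerA_eq_decide (po : List Int) (s : PySem.Set Int) (P : Int)
    (hall : ∀ j : Int, 0 ≤ j → j < P → PySem.Set.contains s (PySem.List.pyGetD po j 0) = true)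
    (hend : P < po.length → PySem.Set.contains s (PySem.List.pyGetD po P 0) = false) :
    ∀ (a c : Int), 0 ≤ a → a ≤ P → c ≤ po.length →
      innerA po s (PySem.List.pyRange a c 1) = decide (P < c) := by
  intro a c
  induction hn : (c - a).toNat generalizing a with
  | zero =>
    intro h0 hap hcl
    rw [PySem.List.pyRange_one_eq_nil (by omega)]
    simp [innerA]; omega
  | succ n ih =>
    intro h0 hap hcl
    rw [PySem.List.pyRange_one_cons (by omega)]
    simp only [innerA]
    by_cases hlt : a < P
    · rw [hall a h0 hlt, if_neg (by simp)]
      exact ih (a + 1) (by omega) (by omega) hlt hcl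
    · have hap' : a = P := by omega
      subst hap'
      rw [hend (by omega)]
      simp; omega

-- advB re-establishes the least-unexecuted-pointer property
theorem advB_inv (rep : List Int) (done : List Bool) :
    ∀ (ptr : Nat),
      (∀ j : Nat, j < ptr →
        PySem.List.pyGetD done (PySem.List.pyGetD rep (j : Int) 0) false = true) →
      ptr ≤ rep.length →
      PtrB rep done (advB rep done ptr) := by
  intro ptr
  induction hn : rep.length - ptr generalizing ptr with
  | zero =>
    intro hall hle
    rw [advB, dif_neg (by omega)]
    exact ⟨hle, hall, fun h => by omega⟩
  | succ n ih =>
    intro hall hle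
    rw [advB]
    by_cases hc : PySem.List.pyGetD done (PySem.List.pyGetD rep (ptr : Int) 0) false = true
    · by_cases hlen : ptr < rep.length
      · rw [dif_pos ⟨hlen, hc⟩]
        exact ih (ptr + 1) (by omega)
          (fun j hj => if hje : j = ptr then hje ▸ hc else hall j (by omega)) (by omega)
      · rw [dif_neg (fun hcontr => hlen hcontr.1)]
        exact ⟨hle, hall, fun h => absurd h hlen⟩
    · rw [dif_neg (fun hcontr => hc hcontr.2)]
      exact ⟨hle, hall, fun _ => Bool.eq_false_iff.mpr hc⟩

-- adding a different value does not change membership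
theorem contains_add_ne (s : PySem.Set Int) (p x : Int) (hne : x ≠ p) :
    PySem.Set.contains (PySem.Set.add s p) x = PySem.Set.contains s x := by
  by_cases hx : x ∈ s
  · have h1 : x ∈ PySem.Set.add s p := (PySem.Set.mem_add s p x).mpr (Or.inl hx)
    have e1 : PySem.Set.contains (PySem.Set.add s p) x = true := by simpa using h1
    have e2 : PySem.Set.contains s x = true := by simpa using hx
    rw [e1, e2]
  · have h1 : x ∉ PySem.Set.add s p :=
      fun hc => hx (((PySem.Set.mem_add s p x).mp hc).resolve_right hne)
    have e1 : PySem.Set.contains (PySem.Set.add s p) x = false :=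
      Bool.eq_false_iff.mpr (fun hc => h1 (by simpa using hc))
    have e2 : PySem.Set.contains s x = false :=
      Bool.eq_false_iff.mpr (fun hc => hx (by simpa using hc))
    rw [e1, e2]

-- marking done[q] never turns a true entry false (indices in range)
theorem pySetD_true_mono (done : List Bool) (q m : Int) (hq0 : 0 ≤ q) (hq : q < done.length)
    (hm0 : 0 ≤ m) (_hm : m < done.length)
    (h : PySem.List.pyGetD done m false = true) :
    PySem.List.pyGetD (PySem.List.pySetD done q true) m false = true := by
  have hqc : q = ((q.toNat : Nat) : Int) := by omega
  have hmc : m = ((m.toNat : Nat) : Int) := by omega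
  rw [hqc, hmc, PySem.List.pyGetD_pySetD_natCast done q.toNat m.toNat true false (by omega)]
  split_ifs with he
  · rfl
  · rw [← hmc]; exact h

-- one step preserves Corr: mark done[q] and add p, where q is p's canonical index
theorem corr_step (po : List Int) (s : PySem.Set Int) (done : List Bool) (p q : Int)
    (hget : (trackA po).get? p = some q)
    (hcorr : Corr po s done) :
    Corr po (PySem.Set.add s p) (PySem.List.pySetD done q true) := by
  obtain ⟨hq0, hqlt, hqval⟩ := track_char po p q hget
  obtain ⟨hlen, hcor⟩ := hcorr
  refine ⟨by rw [PySem.List.length_pySetD]; exact hlen, ?_⟩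
  intro j hj
  obtain ⟨r, hrep, hrlt, hrget, hrval⟩ := rep_spec po j hj
  rw [hrep]
  have hqc : q = ((q.toNat : Nat) : Int) := by omega
  rw [hqc, PySem.List.pyGetD_pySetD_natCast done q.toNat r true false (by omega)]
  by_cases hrq : r = q.toNat
  · rw [if_pos hrq]
    have hvp : PySem.List.pyGetD po (j : Int) 0 = p := by
      rw [pyGetD_at po 0 j hj, ← hrval, hrq, ← hqc]
      exact hqval
    rw [hvp]
    have hmem : p ∈ PySem.Set.add s p := (PySem.Set.mem_add s p p).mpr (Or.inr rfl)
    symm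
    simpa using hmem
  · rw [if_neg hrq, ← hrep, hcor j hj]
    have hne : PySem.List.pyGetD po (j : Int) 0 ≠ p := by
      rw [pyGetD_at po 0 j hj]
      intro he
      rw [he, hget] at hrget
      injection hrget with h2
      omega
    rw [contains_add_ne s p _ hne]

-- the initial done array reads false at every valid index
theorem replicate_pyGetD_false (n r : Nat) (hr : r < n) :
    PySem.List.pyGetD (List.replicate n false) (r : Int) false = false := by
  rw [pyGetD_at _ false r (by simpa using hr)]
  simp

-- under the invariants, A's executed set reads through B's pointer facts
theorem hall_of_inv (po : List Int) (s : PySem.Set Int) (done : List Bool) (ptr : Nat)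
    (hcorr : Corr po s done)
    (hptr : PtrB (po.map (fun v => (trackA po).getD v 0)) done ptr) :
    (∀ i : Int, 0 ≤ i → i < (ptr : Int) →
        PySem.Set.contains s (PySem.List.pyGetD po i 0) = true) ∧
    ((ptr : Int) < po.length →
        PySem.Set.contains s (PySem.List.pyGetD po (ptr : Int) 0) = false) := by
  have hlenrep : (po.map (fun v => (trackA po).getD v 0)).length = po.length := by simp
  constructor
  · intro i h0 hi
    have hic : i = ((i.toNat : Nat) : Int) := by omega
    have hjp : i.toNat < ptr := by omega
    have hjn : i.toNat < po.length := by
      have := hptr.1; omega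
    rw [hic, ← hcorr.2 i.toNat hjn]
    exact hptr.2.1 i.toNat hjp
  · intro hlt
    have hn : ptr < po.length := by exact_mod_cast hlt
    rw [← hcorr.2 ptr hn]
    exact hptr.2.2 (by omega)

-- the two loops agree under the correspondence and pointer invariants
theorem loops_agree (po : List Int) :
    ∀ (eo : List Int) (s : PySem.Set Int) (done : List Bool) (ptr : Nat) (bad : Int),
      Corr po s done →
      PtrB (po.map (fun v => (trackA po).getD v 0)) done ptr →
      loopA po (trackA po) eo bad s =
      loopB (po.map (fun v => (trackA po).getD v 0)) (trackA po) eo ptr bad done := by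
  intro eo
  induction eo with
  | nil => intro s done ptr bad _ _; rfl
  | cons p rest ih =>
    intro s done ptr bad hcorr hptr
    simp only [loopA, loopB]
    cases hget : (trackA po).get? p with
    | none => rfl
    | some q =>
      dsimp only
      obtain ⟨hq0, hqlt, hqval⟩ := track_char po p q hget
      obtain ⟨hall, hend⟩ := hall_of_inv po s done ptr hcorr hptr
      have hlenrep : (po.map (fun v => (trackA po).getD v 0)).length = po.length := by simp
      have hinner :
          innerA po s (PySem.List.pyRange 0 q 1) = decide ((ptr : Int) < q) :=
        innerA_eq_decide po s (ptr : Int) hall hend 0 q le_rfl (by positivity) (by omega)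
      rw [hinner]
      have hcorr' : Corr po (PySem.Set.add s p) (PySem.List.pySetD done q true) :=
        corr_step po s done p q hget hcorr
      have hptr' :
          PtrB (po.map (fun v => (trackA po).getD v 0)) (PySem.List.pySetD done q true)
            (advB (po.map (fun v => (trackA po).getD v 0)) (PySem.List.pySetD done q true) ptr) := by
        refine advB_inv _ _ ptr ?_ ?_
        · intro j hj
          have hjn : j < po.length := by
            have := hptr.1; omega
          obtain ⟨r, hrep, hrlt, _, _⟩ := rep_spec po j hjn
          have hdl : done.length = po.length := hcorr.1
          rw [hrep]
          refine pySetD_true_mono done q (r : Int) hq0 (by omega) (by positivity) (by omega) ?_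
          rw [← hrep]
          exact hptr.2.1 j hj
        · have := hptr.1; omega
      by_cases hlt : (ptr : Int) < q
      · rw [if_pos (by simpa using hlt), if_pos hlt]
        exact ih _ _ _ _ hcorr' hptr'
      · rw [if_neg (by simpa using hlt), if_neg hlt]
        exact ih _ _ _ _ hcorr' hptr'

-- ===== VERDICT (by name: the statement is the Claim_ definition above) =====
theorem countInaccurateResults_spec : Claim_equal_countInaccurateResults := by
  intro po eo _ _
  unfold Spec_countInaccurateResults countInaccurateResults countInaccurateResults_alt
  have hpos : posBuild po 0 PySem.Dict.empty = trackA po :=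
    posBuild_eq_fold po 0 PySem.Dict.empty
  rw [hpos]
  refine loops_agree po eo PySem.Set.empty (List.replicate po.length false) 0 0 ?_ ?_
  · refine ⟨by simp, ?_⟩
    intro j hj
    obtain ⟨r, hrep, hrlt, _, _⟩ := rep_spec po j hj
    rw [hrep, replicate_pyGetD_false po.length r hrlt]
    symm
    exact Bool.eq_false_iff.mpr (fun hc => by simp at hc)
  · refine ⟨Nat.zero_le _, fun j hj => absurd hj (Nat.not_lt_zero j), fun h => ?_⟩
    have hn : (0 : Nat) < po.length := by simpa using h
    obtain ⟨r, hrep, hrlt, _, _⟩ := rep_spec po 0 hn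
    rw [hrep]
    exact replicate_pyGetD_false po.length r hrlt
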